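-- pv_equiv track=rewrite | github.com/Honzaj55/hollyjolly | codlee.py | validate_hex
-- ===== SOURCE A (Python) =====
-- def validate_hex(P):
--     if P== "":
--         return True
--     if len(P) > 6:
--         return False
--     for c in P.upper():
--         if c not in "ABCDEF0123456789":
--             return False
--     return True
-- ===== SOURCE B (Python) =====
-- import re
--
-- _HEX6 = re.compile(r'[0-9A-Fa-f]{0,6}')
--
-- def validate_hex(P):
--     return _HEX6.fullmatch(P) is not None
-- ===== Notes on version B (the rewrite author's own statement) =====
-- stated objective: idiomatic
-- what changed: Replaces the empty-string guard, length branch and explicit per-character loop over P.upper() with a single regular-expression full-match of [0-9A-Fa-f]{0,6}: all length and character-class logic is delegated to the regex engine's automaton traversal (ported as a 7-state counting DFA).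
import Mathlib
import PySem

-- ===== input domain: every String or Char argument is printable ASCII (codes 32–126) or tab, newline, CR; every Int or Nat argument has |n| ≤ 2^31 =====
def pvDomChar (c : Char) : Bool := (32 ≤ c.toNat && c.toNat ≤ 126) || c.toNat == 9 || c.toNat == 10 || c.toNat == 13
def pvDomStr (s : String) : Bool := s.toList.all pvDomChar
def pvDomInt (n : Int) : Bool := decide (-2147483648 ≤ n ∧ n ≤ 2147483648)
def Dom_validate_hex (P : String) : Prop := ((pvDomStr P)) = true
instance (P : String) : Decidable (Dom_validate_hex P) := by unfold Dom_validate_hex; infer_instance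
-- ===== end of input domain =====

-- B replaces A's empty-string guard, length branch and per-character loop over P.upper()
-- with one regex full-match of [0-9A-Fa-f]{0,6}, ported as a 7-state counting DFA (idiomatic; same cost).


-- ===== PORT A =====
-- the 'for c in P.upper(): if c not in "ABCDEF0123456789": return False' loop, early return and all
def validateHexLoopA : List Char → Bool
  | [] => true
  | c :: rest =>
      if ("ABCDEF0123456789".toList.contains c) = false then false
      else validateHexLoopA rest

def validate_hex (P : String) : Bool :=
  if P == "" then true
  else if 6 < PySem.Str.len P then false
  else validateHexLoopA (PySem.Str.upper P).toList

-- ===== PORT B =====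
-- re.fullmatch(r'[0-9A-Fa-f]{0,6}', P): the regex engine run for this pattern is a DFA whose
-- state counts how many class characters have been consumed (none = dead state).
def hexClass (c : Char) : Bool :=
  ('0' ≤ c && c ≤ '9') || ('A' ≤ c && c ≤ 'F') || ('a' ≤ c && c ≤ 'f')

def hexDfaStep (st : Option Nat) (c : Char) : Option Nat :=
  match st with
  | none => none
  | some k => if k < 6 && hexClass c then some (k + 1) else none

def validate_hex_alt (P : String) : Bool :=
  (P.toList.foldl hexDfaStep (some 0)).isSome

-- ===== PRECONDITION & SPEC =====
def Spec_validate_hex (P : String) (out : Bool) : Prop := out = validate_hex_alt P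
instance (P : String) (out : Bool) : Decidable (Spec_validate_hex P out) := by unfold Spec_validate_hex; infer_instance

-- ===== CLAIM (what is proved, stated in full; the proofs are below) =====
def Claim_equal_validate_hex : Prop := ∀ (P : String), Dom_validate_hex P → Spec_validate_hex P (validate_hex P)

-- ===== LEMMAS AND PROOFS =====

lemma hexDfa_none (l : List Char) : l.foldl hexDfaStep none = none := by
  induction l with
  | nil => rfl
  | cons c rest ih => simpa [hexDfaStep] using ih

-- characterisation of the DFA run: it survives iff the length bound and the class test both hold
lemma hexDfa_isSome (l : List Char) : ∀ k : Nat, k ≤ 6 →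
    (l.foldl hexDfaStep (some k)).isSome
      = (decide (l.length + k ≤ 6) && l.all hexClass) := by
  induction l with
  | nil => intro k hk6; simp [hk6]
  | cons c rest ih =>
      intro k _
      simp only [List.foldl_cons, hexDfaStep, List.all_cons, List.length_cons]
      by_cases hk : (k < 6 && hexClass c) = true
      · obtain ⟨hk6, hc⟩ : k < 6 ∧ hexClass c = true := by simpa using hk
        rw [if_pos hk, ih (k + 1) (by omega)]
        by_cases hl : rest.length + (k + 1) ≤ 6
        · simp [hl, hc, Nat.add_right_comm rest.length 1 k, show rest.length + k + 1 ≤ 6 by omega]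
        · simp [hl, hc, show ¬ (rest.length + 1 + k ≤ 6) by omega]
      · rw [if_neg hk, hexDfa_none]
        have hk' : ¬ (k < 6 ∧ hexClass c = true) := by
          intro ⟨h1, h2⟩; exact hk (by simp [h1, h2])
        by_cases h6 : k < 6
        · have hc : hexClass c = false := by
            cases h : hexClass c
            · rfl
            · exact absurd ⟨h6, h⟩ hk'
          simp [hc]
        · simp [show ¬ (rest.length + 1 + k ≤ 6) by omega]
  
-- per-character: for a domain char, A's uppercase-membership equals B's class test
lemma validateHex_char_key (c : Char) (h : pvDomChar c = true) :
    ("ABCDEF0123456789".toList.contains (PySem.Chars.upperChar c)) = hexClass c := by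
  have hlt : c.toNat < 127 := by
    simp only [pvDomChar, Bool.or_eq_true, Bool.and_eq_true, decide_eq_true_eq,
      beq_iff_eq] at h
    omega
  have key : ∀ n, n < 127 →
      ("ABCDEF0123456789".toList.contains (PySem.Chars.upperChar (Char.ofNat n)))
        = hexClass (Char.ofNat n) := by
    set_option maxRecDepth 20000 in decide
  have := key c.toNat hlt
  rwa [Char.ofNat_toNat] at this

lemma allCongrMem (l : List Char) (f g : Char → Bool) (h : ∀ c ∈ l, f c = g c) :
    l.all f = l.all g := by
  induction l with
  | nil => rfl
  | cons c rest ih =>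
      simp only [List.all_cons, h c (by simp), ih (fun x hx => h x (by simp [hx]))]

-- A's loop is the 'all' of its membership test
lemma validateHexLoopA_eq_all (l : List Char) :
    validateHexLoopA l = l.all (fun c => "ABCDEF0123456789".toList.contains c) := by
  induction l with
  | nil => rfl
  | cons c rest ih =>
      simp only [validateHexLoopA, List.all_cons, ih]
      cases hc : ("ABCDEF0123456789".toList.contains c) <;> simp

-- ===== VERDICT (by name: the statement is the Claim_ definition above) =====
theorem validate_hex_spec : Claim_equal_validate_hex := by
  intro P hDom
  unfold Spec_validate_hex validate_hex validate_hex_alt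
  have hmem : ∀ c ∈ P.toList, pvDomChar c = true := by
    simpa [Dom_validate_hex, pvDomStr, List.all_eq_true] using hDom
  have hlen : PySem.Str.len P = P.toList.length := by
    simp [PySem.Str.len]
  have hB : (P.toList.foldl hexDfaStep (some 0)).isSome
      = (decide (P.toList.length ≤ 6) && P.toList.all hexClass) := by
    simpa using hexDfa_isSome P.toList 0 (by omega)
  have hupper : (PySem.Str.upper P).toList = P.toList.map PySem.Chars.upperChar := by
    simp only [pysem]; rfl
  rw [hB]
  by_cases hE : (P == "") = true
  · have hP : P = "" := by simpa using hE
    subst hP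
    simp
  · rw [if_neg hE]
    by_cases hL : 6 < PySem.Str.len P
    · rw [if_pos hL]
      have h6 : decide (P.toList.length ≤ 6) = false := by
        rw [hlen] at hL; simp at hL ⊢; omega
      rw [h6, Bool.false_and]
    · rw [if_neg hL]
      have h6 : decide (P.toList.length ≤ 6) = true := by
        rw [hlen] at hL; simp at hL ⊢; omega
      rw [h6, Bool.true_and, validateHexLoopA_eq_all, hupper, List.all_map]
      refine allCongrMem _ _ _ (fun c hc => ?_)
      simpa [Function.comp] using validateHex_char_key c (hmem c hc)
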